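-- pv_equiv track=rewrite | github.com/pypi-data/pypi-mirror-27 | packages/phenum/phenum-1.5.6-py2.7.egg/phenum/phonons.py | _col_sort
-- ===== SOURCE A (Python) =====
-- def _col_sort(col_list):
--     """Sorts the labeling so that colors with arrows appear last in the
--     list and so that the arrowed and non-arrowed colors are sorted
--     from lowest to highest concentration.
--
--     :arg col_list: a 2D integer array of the full labeling of the
--     system
--     """
--
--     col1 = []
--     col2 = []
--     colt=[]
--
--     # seperate the arrays into colors with arrrows and colors without
--     for i in col_list:
--         if i[0] < 0:
--             col1.append(i)
--         elif i[0] >= 0: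
--             col2.append(i)
--
--     # sort each array by concentration
--     col1 = sorted(col1, key = col1.count, reverse=True)
--     col2 = sorted(col2, key = col2.count, reverse=True)
--
--     # put them back together again
--     for i in col1:
--         colt.append(i)
--     for i in col2:
--         colt.append(i)
--
--     return(colt)
-- ===== SOURCE B (Python) =====
-- def _col_sort(col_list):
--     freq = {}
--     for row in col_list:
--         k = tuple(row)
--         freq[k] = freq.get(k, 0) + 1
--     return sorted(col_list, key=lambda x: (x[0] >= 0, -freq[tuple(x)]))
-- ===== Notes on version B (the rewrite author's own statement) =====
-- stated objective: simpler
-- what changed: Replaces A's partition-into-two-lists, two separate count-keyed sorts and two concatenation loops with one frequency dict built in a single pass and one stable sort of the whole list under the composite key (sign-group, -frequency).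
import Mathlib
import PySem

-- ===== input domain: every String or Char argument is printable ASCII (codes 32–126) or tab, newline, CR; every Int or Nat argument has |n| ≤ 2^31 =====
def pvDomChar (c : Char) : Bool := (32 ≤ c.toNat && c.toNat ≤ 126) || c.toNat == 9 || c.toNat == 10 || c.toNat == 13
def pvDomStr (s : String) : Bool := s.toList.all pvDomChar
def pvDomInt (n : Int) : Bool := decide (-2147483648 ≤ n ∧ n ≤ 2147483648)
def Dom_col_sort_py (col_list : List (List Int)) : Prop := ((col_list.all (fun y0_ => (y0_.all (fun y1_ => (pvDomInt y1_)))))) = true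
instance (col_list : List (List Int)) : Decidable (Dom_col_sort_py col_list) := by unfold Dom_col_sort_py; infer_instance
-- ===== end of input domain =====

-- B builds one frequency dict and does a single stable sort with key (x[0] >= 0, -freq),
-- replacing A's partition + two count-keyed sorts + concatenation loops (simpler decomposition).
-- A raises IndexError on an empty row (i[0]); Pre_ excludes those inputs.


-- ===== PORT A =====
def col_sort_py (col_list : List (List Int)) : List (List Int) :=
  -- the partition loop over col_list building col1 (i[0] < 0) and col2 (i[0] >= 0);
  -- i[0] is ported as pyGetD i 0 0: Pre_ excludes the empty rows where Python raises
  let pair := col_list.foldl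
    (fun (p : List (List Int) × List (List Int)) i =>
      if PySem.List.pyGetD i 0 0 < 0 then (p.1 ++ [i], p.2)
      else if 0 ≤ PySem.List.pyGetD i 0 0 then (p.1, p.2 ++ [i])
      else p) ([], [])
  let col1 := pair.1
  let col2 := pair.2
  -- col1 = sorted(col1, key=col1.count, reverse=True), same for col2
  let col1' := PySem.List.sorted col1 (fun x => PySem.List.count col1 x) true
  let col2' := PySem.List.sorted col2 (fun x => PySem.List.count col2 x) true
  -- the two append loops into colt
  let colt := col1'.foldl (fun acc i => acc ++ [i]) []
  let colt := col2'.foldl (fun acc i => acc ++ [i]) colt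
  colt

-- ===== PORT B =====
def col_sort_py_alt (col_list : List (List Int)) : List (List Int) :=
  -- freq[k] = freq.get(k, 0) + 1 over all rows
  let freq : PySem.Dict (List Int) Int :=
    col_list.foldl (fun d row => d.modify row 0 (· + 1)) PySem.Dict.empty
  -- sorted(col_list, key=lambda x: (x[0] >= 0, -freq[tuple(x)]))
  PySem.List.sorted2 col_list
    (fun x => decide (0 ≤ PySem.List.pyGetD x 0 0))
    (fun x => -(freq.getD x 0)) false

-- ===== PRECONDITION & SPEC =====
-- Pre_ excludes exactly the inputs containing an empty row, on which Python A raises IndexError at i[0].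
def Pre_col_sort_py (col_list : List (List Int)) : Prop := ∀ r ∈ col_list, r ≠ []
instance (col_list : List (List Int)) : Decidable (Pre_col_sort_py col_list) := by unfold Pre_col_sort_py; infer_instance
def pvWitness_col_sort_py : List (List Int) := [[-1, 2], [3], [-1, 2]]

def Spec_col_sort_py (col_list : List (List Int)) (out : List (List Int)) : Prop := out = col_sort_py_alt col_list
instance (col_list : List (List Int)) (out : List (List Int)) : Decidable (Spec_col_sort_py col_list out) := by unfold Spec_col_sort_py; infer_instance

-- ===== CLAIM (what is proved, stated in full; the proofs are below) =====
def Claim_equal_col_sort_py : Prop := ∀ (col_list : List (List Int)), Dom_col_sort_py col_list → Pre_col_sort_py col_list → Spec_col_sort_py col_list (col_sort_py col_list)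

-- ===== LEMMAS AND PROOFS =====

-- the sign test that partitions the rows
def pvNeg (i : List Int) : Bool := decide (PySem.List.pyGetD i 0 0 < 0)

-- A's partition loop is the two filters
theorem pv_pair_fold (l : List (List Int)) (a1 a2 : List (List Int)) :
    l.foldl (fun (p : List (List Int) × List (List Int)) i =>
      if PySem.List.pyGetD i 0 0 < 0 then (p.1 ++ [i], p.2)
      else if 0 ≤ PySem.List.pyGetD i 0 0 then (p.1, p.2 ++ [i])
      else p) (a1, a2)
    = (a1 ++ l.filter pvNeg, a2 ++ l.filter (fun i => !pvNeg i)) := by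
  induction l generalizing a1 a2 with
  | nil => simp
  | cons x t ih =>
    rw [List.foldl_cons]
    by_cases hx : PySem.List.pyGetD x 0 0 < 0
    · rw [if_pos hx, ih]
      simp [pvNeg, hx]
    · rw [if_neg hx, if_pos (not_lt.mp hx), ih]
      simp [pvNeg, hx]

-- insertBy only reads `before x ·` on members of the list
theorem pv_insertBy_congr {α : Type} (b b' : α → α → Bool) (x : α) (l : List α)
    (h : ∀ y ∈ l, b x y = b' x y) :
    PySem.List.insertBy b x l = PySem.List.insertBy b' x l := by
  induction l with
  | nil => rfl
  | cons y t ih =>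
    simp only [PySem.List.insertBy, h y (by simp)]
    split <;> simp [ih (fun z hz => h z (by simp [hz]))]

-- insert into the left block when every right element compares `true`
theorem pv_insertBy_append_true {α : Type} (b b' : α → α → Bool) (x : α) (l1 l2 : List α)
    (h1 : ∀ y ∈ l1, b x y = b' x y) (h2 : ∀ y ∈ l2, b x y = true) :
    PySem.List.insertBy b x (l1 ++ l2) = PySem.List.insertBy b' x l1 ++ l2 := by
  induction l1 with
  | nil =>
    cases l2 with
    | nil => rfl
    | cons y t => simp [PySem.List.insertBy, h2 y (by simp)]
  | cons y t ih =>
    simp only [List.cons_append, PySem.List.insertBy, h1 y (by simp)]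
    split <;> simp [ih (fun z hz => h1 z (by simp [hz]))]

-- skip the whole left block when every left element compares `false`
theorem pv_insertBy_append_false {α : Type} (b : α → α → Bool) (x : α) (l1 l2 : List α)
    (h1 : ∀ y ∈ l1, b x y = false) :
    PySem.List.insertBy b x (l1 ++ l2) = l1 ++ PySem.List.insertBy b x l2 := by
  induction l1 with
  | nil => rfl
  | cons y t ih =>
    simp [PySem.List.insertBy, h1 y (by simp), ih (fun z hz => h1 z (by simp [hz]))]

-- membership through insertBy (kept local to the fold invariant below)
theorem pv_mem_insertBy {α : Type} (b : α → α → Bool) (x y : α) (l : List α)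
    (h : y ∈ PySem.List.insertBy b x l) : y = x ∨ y ∈ l := by
  induction l with
  | nil => simpa [PySem.List.insertBy] using h
  | cons z t ih =>
    simp only [PySem.List.insertBy] at h
    split at h
    · rcases (by simpa using h : y = x ∨ y = z ∨ y ∈ t) with h | h | h
      · exact Or.inl h
      · exact Or.inr (by simp [h])
      · exact Or.inr (by simp [h])
    · rcases (by simpa using h : y = z ∨ y ∈ PySem.List.insertBy b x t) with h | h
      · exact Or.inr (by simp [h])
      · rcases ih h with h | h
        · exact Or.inl h
        · exact Or.inr (by simp [h])

-- the crux: one lex-keyed stable insertion sort = insertion sort of the `false` group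
-- followed by insertion sort of the `true` group, both under the second key alone
theorem pv_split_fold {α κ : Type} [LinearOrder κ] (k1 : α → Bool) (k2 : α → κ)
    (xs a1 a2 : List α)
    (h1 : ∀ y ∈ a1, k1 y = false) (h2 : ∀ y ∈ a2, k1 y = true) :
    xs.foldl (fun acc x => PySem.List.insertBy
        (fun a b => decide (k1 a < k1 b) || (!decide (k1 b < k1 a) && decide (k2 a < k2 b))) x acc)
      (a1 ++ a2)
    = (xs.filter (fun x => !k1 x)).foldl
        (fun acc x => PySem.List.insertBy (fun a b => decide (k2 a < k2 b)) x acc) a1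
      ++ (xs.filter k1).foldl
        (fun acc x => PySem.List.insertBy (fun a b => decide (k2 a < k2 b)) x acc) a2 := by
  induction xs generalizing a1 a2 with
  | nil => simp
  | cons x t ih =>
    by_cases hx : k1 x = true
    · rw [List.foldl_cons,
        pv_insertBy_append_false _ x a1 a2
          (fun y hy => by simp [hx, h1 y hy, Bool.lt_iff]),
        pv_insertBy_congr _ (fun a b => decide (k2 a < k2 b)) x a2
          (fun y hy => by simp [hx, h2 y hy]),
        ih a1 (PySem.List.insertBy _ x a2) h1
          (fun y hy => by rcases pv_mem_insertBy _ _ _ _ hy with h | h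
                          · simpa [h] using hx
                          · exact h2 y h)]
      simp [hx]
    · have hx' : k1 x = false := by simpa using hx
      rw [List.foldl_cons,
        pv_insertBy_append_true _ (fun a b => decide (k2 a < k2 b)) x a1 a2
          (fun y hy => by simp [hx', h1 y hy])
          (fun y hy => by simp [hx', h2 y hy, Bool.lt_iff]),
        ih (PySem.List.insertBy _ x a1) a2
          (fun y hy => by rcases pv_mem_insertBy _ _ _ _ hy with h | h
                          · simpa [h] using hx'
                          · exact h1 y h) h2]
      simp [hx']

-- folded insertion sort only reads the key on members of xs and of the accumulator
theorem pv_fold_insert_congr {α : Type} (b b' : α → α → Bool)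
    (xs acc : List α) (S : List α)
    (hxs : ∀ x ∈ xs, x ∈ S) (hacc : ∀ x ∈ acc, x ∈ S)
    (hb : ∀ x ∈ S, ∀ y ∈ S, b x y = b' x y) :
    xs.foldl (fun acc x => PySem.List.insertBy b x acc) acc
      = xs.foldl (fun acc x => PySem.List.insertBy b' x acc) acc := by
  induction xs generalizing acc with
  | nil => rfl
  | cons x t ih =>
    have hxS : x ∈ S := hxs x (by simp)
    rw [List.foldl_cons, List.foldl_cons,
      pv_insertBy_congr b b' x acc (fun y hy => hb x hxS y (hacc y hy))]
    exact ih _ (fun z hz => hxs z (by simp [hz]))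
      (fun z hz => by rcases pv_mem_insertBy _ _ _ _ hz with h | h
                      · simpa [h] using hxS
                      · exact hacc z h)

-- the split lemma with empty accumulators
theorem pv_split_fold_nil {α κ : Type} [LinearOrder κ] (k1 : α → Bool) (k2 : α → κ) (xs : List α) :
    xs.foldl (fun acc x => PySem.List.insertBy
        (fun a b => decide (k1 a < k1 b) || (!decide (k1 b < k1 a) && decide (k2 a < k2 b))) x acc) []
    = (xs.filter (fun x => !k1 x)).foldl
        (fun acc x => PySem.List.insertBy (fun a b => decide (k2 a < k2 b)) x acc) []
      ++ (xs.filter k1).foldl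
        (fun acc x => PySem.List.insertBy (fun a b => decide (k2 a < k2 b)) x acc) [] := by
  simpa using pv_split_fold k1 k2 xs [] [] (by simp) (by simp)

-- ===== VERDICT (by name: the statement is the Claim_ definition above) =====
theorem col_sort_py_spec : Claim_equal_col_sort_py := by
  intro col_list _ _
  unfold Spec_col_sort_py col_sort_py col_sort_py_alt
  simp only [pv_pair_fold, List.nil_append, PySem.List.foldl_append_singleton,
    PySem.List.sorted_rev_eq_foldl_insertBy, PySem.List.count, PySem.List.sorted2,
    Bool.false_eq_true, if_false, PySem.Dict.getD_foldl_modify_add_one,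
    PySem.Dict.getD_empty, zero_add]
  rw [pv_split_fold_nil]
  have hf1 : (fun (x : List Int) => !decide (0 ≤ PySem.List.pyGetD x 0 0)) = pvNeg := by
    funext i
    simp only [pvNeg, ← decide_not, decide_eq_decide]
    omega
  have hf2 : (fun (x : List Int) => decide (0 ≤ PySem.List.pyGetD x 0 0))
      = (fun (i : List Int) => !pvNeg i) := by
    funext i
    simp only [pvNeg, ← decide_not, decide_eq_decide]
    omega
  rw [hf1, hf2]
  congr 1
  · apply pv_fold_insert_congr _ _ _ _ (col_list.filter pvNeg)
      (fun x hx => hx) (by simp)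
    intro x hx y hy
    rw [List.count_filter (p := pvNeg) (List.mem_filter.mp hx).2,
      List.count_filter (p := pvNeg) (List.mem_filter.mp hy).2]
    simp only [decide_eq_decide]
    omega
  · apply pv_fold_insert_congr _ _ _ _ (col_list.filter (fun i => !pvNeg i))
      (fun x hx => hx) (by simp)
    intro x hx y hy
    rw [List.count_filter (p := fun i => !pvNeg i) (List.mem_filter.mp hx).2,
      List.count_filter (p := fun i => !pvNeg i) (List.mem_filter.mp hy).2]
    simp only [decide_eq_decide]
    omega
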